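-- pv_equiv track=rewrite | github.com/Abdulrahman-02/AI | tp1.py | duplicated
-- ===== SOURCE A (Python) =====
-- def duplicated(list=[]):
--     dList = []
--     nonDuplicate = []
--     dup = []
--     for i in list:
--         if i not in nonDuplicate:
--             nonDuplicate.append(i)
--         else:
--             dup.append(i)
--     for i in list:
--         if i in dup:
--              dList.append(True)
--         else:
--              dList.append(False)
--     return dList
-- ===== SOURCE B (Python) =====
-- def duplicated(list=[]):
--     return [list.count(x) > 1 for x in list]
-- ===== Notes on version B (the rewrite author's own statement) =====
-- stated objective: simpler
-- what changed: Replaces A's two sequential passes building seen/dup membership tables with a single comprehension that rescans the list via list.count for each element.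
import Mathlib
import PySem

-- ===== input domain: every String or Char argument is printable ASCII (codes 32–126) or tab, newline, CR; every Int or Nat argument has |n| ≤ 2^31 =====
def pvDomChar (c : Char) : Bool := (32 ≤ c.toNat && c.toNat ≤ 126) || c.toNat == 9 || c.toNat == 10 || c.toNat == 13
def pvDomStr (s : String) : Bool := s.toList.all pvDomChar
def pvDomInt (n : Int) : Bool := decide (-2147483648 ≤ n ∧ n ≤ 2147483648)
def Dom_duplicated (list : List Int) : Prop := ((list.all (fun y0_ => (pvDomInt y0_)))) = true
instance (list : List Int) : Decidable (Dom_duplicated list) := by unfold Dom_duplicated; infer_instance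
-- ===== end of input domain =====

-- B replaces A's two table-building passes by a per-element rescan with count; objective: simpler.

-- ===== PORT A =====
-- first loop: split into nonDuplicate / dup
def duplicated_split (l : List Int) : List Int × List Int :=
  l.foldl (fun s i => if i ∉ s.1 then (s.1 ++ [i], s.2) else (s.1, s.2 ++ [i])) ([], [])

def duplicated (list : List Int) : List Bool :=
  let s := duplicated_split list
  list.foldl (fun dList i => dList ++ [if i ∈ s.2 then true else false]) []

-- ===== PORT B =====
def duplicated_alt (list : List Int) : List Bool :=
  list.map (fun x => decide (PySem.List.count list x > 1))

-- ===== PRECONDITION & SPEC =====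
def Spec_duplicated (list : List Int) (out : List Bool) : Prop := out = duplicated_alt list
instance (list : List Int) (out : List Bool) : Decidable (Spec_duplicated list out) := by unfold Spec_duplicated; infer_instance

-- ===== CLAIM (what is proved, stated in full; the proofs are below) =====
def Claim_equal_duplicated : Prop := ∀ (list : List Int), Dom_duplicated list → Spec_duplicated list (duplicated list)

-- ===== LEMMAS AND PROOFS =====

/-- Invariant of A's first loop: if the accumulators characterise "count so far ≥ 1 / ≥ 2"
    (via an abstract count `f` of the already-processed prefix), then the final `dup` list
    contains exactly the values occurring at least twice in total. -/
theorem duplicated_split_invariant (l : List Int) (nd dup : List Int) (f : Int → Nat)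
    (h1 : ∀ x, x ∈ nd ↔ 1 ≤ f x) (h2 : ∀ x, x ∈ dup ↔ 2 ≤ f x) :
    ∀ x, x ∈ (l.foldl (fun s i => if i ∉ s.1 then (s.1 ++ [i], s.2) else (s.1, s.2 ++ [i]))
                (nd, dup)).2 ↔ 2 ≤ f x + l.count x := by
  induction l generalizing nd dup f with
  | nil => intro x; simp [h2 x]
  | cons i t ih =>
    intro x
    set g : Int → Nat := fun y => f y + if y = i then 1 else 0 with hg
    have hcount : f x + (i :: t).count x = g x + t.count x := by
      by_cases hx : x = i <;> simp [g, List.count_cons, hx] <;> omega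
    rw [List.foldl_cons, hcount]
    by_cases hi : i ∈ nd
    · have h1' : ∀ y, y ∈ nd ↔ 1 ≤ g y := by
        intro y
        by_cases hy : y = i
        · subst hy; simp [g, hi]
        · simp [g, h1 y, hy]
      have h2' : ∀ y, y ∈ dup ++ [i] ↔ 2 ≤ g y := by
        intro y
        by_cases hy : y = i
        · subst hy
          have := (h1 y).mp hi
          simp [g, h2 y]; omega
        · simp [g, h2 y, hy]
      simpa [hi] using ih nd (dup ++ [i]) g h1' h2' x
    · have hfi : f i = 0 := by
        by_cases h : 1 ≤ f i
        · exact absurd ((h1 i).mpr h) hi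
        · omega
      have h1' : ∀ y, y ∈ nd ++ [i] ↔ 1 ≤ g y := by
        intro y
        by_cases hy : y = i
        · subst hy; simp [g, hfi]
        · simp [g, h1 y, hy]
      have h2' : ∀ y, y ∈ dup ↔ 2 ≤ g y := by
        intro y
        by_cases hy : y = i
        · subst hy; simp [g, h2 y, hfi]
        · simp [g, h2 y, hy]
      simpa [hi] using ih (nd ++ [i]) dup g h1' h2' x

theorem mem_duplicated_split_snd (l : List Int) (x : Int) :
    x ∈ (duplicated_split l).2 ↔ 2 ≤ l.count x := by
  have := duplicated_split_invariant l [] [] (fun _ => 0)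
    (by simp) (by simp) x
  simpa [duplicated_split] using this

-- ===== VERDICT (by name: the statement is the Claim_ definition above) =====
theorem duplicated_spec : Claim_equal_duplicated := by
  intro list _
  unfold Spec_duplicated duplicated duplicated_alt
  rw [PySem.List.foldl_append_singleton_eq_map]
  simp only [List.nil_append]
  apply List.map_congr_left
  intro x _
  by_cases hx : 2 ≤ list.count x
  · simp [(mem_duplicated_split_snd list x).mpr hx, PySem.List.count_eq]
    omega
  · have : x ∉ (duplicated_split list).2 := fun h =>
      hx ((mem_duplicated_split_snd list x).mp h)
    simp [this, PySem.List.count_eq]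
    omega
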